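-- pv_equiv track=rewrite | github.com/alejagomez12/Proyecto-programacion | Proyecto_final.py | contar_disponibles_de_piso
-- ===== SOURCE A (Python) =====
-- def contar_disponibles_de_piso(Piso,Piso_ocupacion,Tipo_de_vehiculo):
--     #Se verifica la cantidad de números que corresponden con el tipo de vehículo
--     if Tipo_de_vehiculo == "Automóvil":
--         contador_de_disponibles = 0
--         for i in range(len(Piso)):
--             for j in range(len(Piso[0])):
--                 if Piso[i][j] == 1 and Piso_ocupacion[i][j] == 0:
--                     contador_de_disponibles += 1
--     elif Tipo_de_vehiculo == "Eléctrico":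
--         contador_de_disponibles = 0
--         for i in range(len(Piso)):
--             for j in range(len(Piso[0])):
--                 if (Piso[i][j] == 2 or Piso[i][j] == 1) and Piso_ocupacion[i][j] == 0:
--                     contador_de_disponibles += 1
--     elif Tipo_de_vehiculo == "Motocicleta":
--         contador_de_disponibles = 0
--         for i in range(len(Piso)):
--             for j in range(len(Piso[0])):
--                 if Piso[i][j] == 3 and Piso_ocupacion[i][j] == 0:
--                     contador_de_disponibles += 1
--     elif Tipo_de_vehiculo == "Discapacitado":
--         contador_de_disponibles = 0
--         for i in range(len(Piso)):
--             for j in range(len(Piso[0])):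
--                 if (Piso[i][j] == 4 or Piso[i][j] == 1) and Piso_ocupacion[i][j] == 0:
--                     contador_de_disponibles += 1
--
--     return contador_de_disponibles
-- ===== SOURCE B (Python) =====
-- def contar_disponibles_de_piso(Piso, Piso_ocupacion, Tipo_de_vehiculo):
--     CODIGOS = {"Automóvil": [1], "Eléctrico": [2, 1],
--                "Motocicleta": [3], "Discapacitado": [4, 1]}
--     codigos = CODIGOS[Tipo_de_vehiculo]
--     # pass 1: histogram of the spot codes over the free cells only
--     libres = {}
--     for i in range(len(Piso)):
--         for j in range(len(Piso[0])):
--             if Piso_ocupacion[i][j] == 0: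
--                 c = Piso[i][j]
--                 libres[c] = libres.get(c, 0) + 1
--     # pass 2: query the histogram for this vehicle type's codes
--     return sum(libres.get(c, 0) for c in codigos)
-- ===== Notes on version B (the rewrite author's own statement) =====
-- stated objective: alternative
-- what changed: Replaces A's four duplicated filtered counting loops by two stages: one type-independent pass builds a histogram (dict) of spot codes over the free cells, then the answer is the sum of the histogram entries for the vehicle type's code list.
-- outside the precondition, e.g. on contar_disponibles_de_piso([[2]], [], 'Motocicleta'): A returns 0, B raises IndexError; on contar_disponibles_de_piso([[1, 2]], [[0]], 'Motocicleta'): A returns 0, B raises IndexError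
import Mathlib
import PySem

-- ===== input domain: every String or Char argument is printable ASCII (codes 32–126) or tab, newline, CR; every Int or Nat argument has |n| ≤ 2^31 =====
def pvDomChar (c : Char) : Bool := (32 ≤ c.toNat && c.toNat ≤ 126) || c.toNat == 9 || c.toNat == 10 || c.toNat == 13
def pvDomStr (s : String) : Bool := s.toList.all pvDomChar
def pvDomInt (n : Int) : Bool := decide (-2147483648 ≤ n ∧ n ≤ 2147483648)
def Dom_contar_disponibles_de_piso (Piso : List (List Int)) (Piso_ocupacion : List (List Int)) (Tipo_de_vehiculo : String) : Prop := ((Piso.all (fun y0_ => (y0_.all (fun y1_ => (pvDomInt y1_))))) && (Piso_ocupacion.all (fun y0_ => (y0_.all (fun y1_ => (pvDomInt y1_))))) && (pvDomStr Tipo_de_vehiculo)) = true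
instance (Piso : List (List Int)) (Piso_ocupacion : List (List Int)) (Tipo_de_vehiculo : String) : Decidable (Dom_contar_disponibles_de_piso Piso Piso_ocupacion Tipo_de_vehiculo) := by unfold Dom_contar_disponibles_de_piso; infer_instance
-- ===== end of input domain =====

-- B replaces A's four duplicated filtered counting loops by two stages: a type-independent
-- histogram of spot codes over the free cells, then a lookup-sum for the type's codes
-- (objective: alternative algorithm, same asymptotic cost).

-- ===== PORT A =====
-- All indices A uses are nonnegative and, under Pre_, in range, so List.getD is exact here.
def contar_disponibles_de_piso (Piso : List (List Int)) (Piso_ocupacion : List (List Int)) (Tipo_de_vehiculo : String) : Int :=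
  if Tipo_de_vehiculo = "Automóvil" then
    (List.range Piso.length).foldl (fun c i =>
      (List.range (Piso.getD 0 []).length).foldl (fun c j =>
        if (Piso.getD i []).getD j 0 = 1 ∧ (Piso_ocupacion.getD i []).getD j 0 = 0 then c + 1 else c) c) 0
  else if Tipo_de_vehiculo = "Eléctrico" then
    (List.range Piso.length).foldl (fun c i =>
      (List.range (Piso.getD 0 []).length).foldl (fun c j =>
        if ((Piso.getD i []).getD j 0 = 2 ∨ (Piso.getD i []).getD j 0 = 1) ∧ (Piso_ocupacion.getD i []).getD j 0 = 0 then c + 1 else c) c) 0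
  else if Tipo_de_vehiculo = "Motocicleta" then
    (List.range Piso.length).foldl (fun c i =>
      (List.range (Piso.getD 0 []).length).foldl (fun c j =>
        if (Piso.getD i []).getD j 0 = 3 ∧ (Piso_ocupacion.getD i []).getD j 0 = 0 then c + 1 else c) c) 0
  else if Tipo_de_vehiculo = "Discapacitado" then
    (List.range Piso.length).foldl (fun c i =>
      (List.range (Piso.getD 0 []).length).foldl (fun c j =>
        if ((Piso.getD i []).getD j 0 = 4 ∨ (Piso.getD i []).getD j 0 = 1) ∧ (Piso_ocupacion.getD i []).getD j 0 = 0 then c + 1 else c) c) 0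
  else 0  -- Python A raises UnboundLocalError here; outside Pre_

-- ===== PORT B =====
def contar_disponibles_de_piso_alt (Piso : List (List Int)) (Piso_ocupacion : List (List Int)) (Tipo_de_vehiculo : String) : Int :=
  let CODIGOS : PySem.Dict String (List Int) := PySem.Dict.ofList
    [("Automóvil", [1]), ("Eléctrico", [2, 1]), ("Motocicleta", [3]), ("Discapacitado", [4, 1])]
  match PySem.Dict.get? CODIGOS Tipo_de_vehiculo with
  | none => 0  -- Python B raises KeyError here; outside Pre_
  | some codigos =>
    -- pass 1: histogram of the spot codes over the free cells only
    let libres : PySem.Dict Int Int :=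
      (List.range Piso.length).foldl (fun d i =>
        (List.range (Piso.getD 0 []).length).foldl (fun d j =>
          if (Piso_ocupacion.getD i []).getD j 0 = 0 then
            let c := (Piso.getD i []).getD j 0
            PySem.Dict.insert d c (PySem.Dict.getD d c 0 + 1)
          else d) d) PySem.Dict.empty
    -- pass 2: query the histogram for this vehicle type's codes
    codigos.foldl (fun s c => s + PySem.Dict.getD libres c 0) 0

-- ===== PRECONDITION & SPEC =====
-- Pre_ excludes unknown vehicle types (A raises UnboundLocalError, B raises KeyError) and
-- ragged/mismatched layouts (a zipped row shorter than len(Piso[0]), or Piso_ocupacion shorter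
-- than Piso): there A usually raises IndexError, and when its short-circuit `and` happens to skip
-- the bad access it returns a value only by accident, while B (which always reads the occupancy
-- cell) raises IndexError.
def Pre_contar_disponibles_de_piso (Piso : List (List Int)) (Piso_ocupacion : List (List Int)) (Tipo_de_vehiculo : String) : Prop :=
  (Tipo_de_vehiculo = "Automóvil" ∨ Tipo_de_vehiculo = "Eléctrico" ∨
   Tipo_de_vehiculo = "Motocicleta" ∨ Tipo_de_vehiculo = "Discapacitado") ∧
  ((Piso.getD 0 []).length = 0 ∨
    (Piso.length ≤ Piso_ocupacion.length ∧
     ∀ fr ∈ List.zip Piso Piso_ocupacion,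
       (Piso.getD 0 []).length ≤ fr.1.length ∧ (Piso.getD 0 []).length ≤ fr.2.length))
instance (Piso : List (List Int)) (Piso_ocupacion : List (List Int)) (Tipo_de_vehiculo : String) : Decidable (Pre_contar_disponibles_de_piso Piso Piso_ocupacion Tipo_de_vehiculo) := by unfold Pre_contar_disponibles_de_piso; infer_instance

def pvWitness_contar_disponibles_de_piso : List (List Int) × List (List Int) × String :=
  ([[3, 1], [3, 3]], [[0, 1], [0, 0]], "Motocicleta")

def Spec_contar_disponibles_de_piso (Piso : List (List Int)) (Piso_ocupacion : List (List Int)) (Tipo_de_vehiculo : String) (out : Int) : Prop := out = contar_disponibles_de_piso_alt Piso Piso_ocupacion Tipo_de_vehiculo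
instance (Piso : List (List Int)) (Piso_ocupacion : List (List Int)) (Tipo_de_vehiculo : String) (out : Int) : Decidable (Spec_contar_disponibles_de_piso Piso Piso_ocupacion Tipo_de_vehiculo out) := by unfold Spec_contar_disponibles_de_piso; infer_instance

-- ===== CLAIM (what is proved, stated in full; the proofs are below) =====
def Claim_equal_contar_disponibles_de_piso : Prop := ∀ (Piso : List (List Int)) (Piso_ocupacion : List (List Int)) (Tipo_de_vehiculo : String), Dom_contar_disponibles_de_piso Piso Piso_ocupacion Tipo_de_vehiculo → Pre_contar_disponibles_de_piso Piso Piso_ocupacion Tipo_de_vehiculo → Spec_contar_disponibles_de_piso Piso Piso_ocupacion Tipo_de_vehiculo (contar_disponibles_de_piso Piso Piso_ocupacion Tipo_de_vehiculo)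

-- ===== LEMMAS AND PROOFS =====

-- The list of spot codes of the free cells, in the traversal order both ports use.
def pvFreeCodes (Piso : List (List Int)) (Piso_ocupacion : List (List Int)) : List Int :=
  (List.range Piso.length).flatMap (fun i =>
    ((List.range (Piso.getD 0 []).length).filter
        (fun j => decide ((Piso_ocupacion.getD i []).getD j 0 = 0))).map
      (fun j => (Piso.getD i []).getD j 0))

-- A's nested counting loop counts exactly the free-cell codes satisfying its predicate.
theorem pvA_eq_countP (P O : List (List Int)) (q : Int → Prop) [DecidablePred q] :
    (List.range P.length).foldl (fun c i =>
      (List.range (P.getD 0 []).length).foldl (fun c j =>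
        if q ((P.getD i []).getD j 0) ∧ (O.getD i []).getD j 0 = 0 then c + 1 else c) c) (0 : Int)
    = ((pvFreeCodes P O).countP (fun x => decide (q x)) : Int) := by
  have hinner : ∀ (i : Nat) (c : Int),
      (List.range (P.getD 0 []).length).foldl (fun c j =>
        if q ((P.getD i []).getD j 0) ∧ (O.getD i []).getD j 0 = 0 then c + 1 else c) c
      = c + ((((List.range (P.getD 0 []).length).filter
            (fun j => decide ((O.getD i []).getD j 0 = 0))).map
            (fun j => (P.getD i []).getD j 0)).countP (fun x => decide (q x)) : Int) := by
    intro i c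
    rw [PySem.List.foldl_ite_add_one
      (fun j => q ((P.getD i []).getD j 0) ∧ (O.getD i []).getD j 0 = 0)]
    congr 2
    rw [List.countP_map, List.countP_filter]
    apply List.countP_congr
    intro j _
    simp [Function.comp]
  calc (List.range P.length).foldl (fun c i =>
        (List.range (P.getD 0 []).length).foldl (fun c j =>
          if q ((P.getD i []).getD j 0) ∧ (O.getD i []).getD j 0 = 0 then c + 1 else c) c) (0 : Int)
      = (List.range P.length).foldl (fun c i => c +
          ((((List.range (P.getD 0 []).length).filter
              (fun j => decide ((O.getD i []).getD j 0 = 0))).map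
              (fun j => (P.getD i []).getD j 0)).countP (fun x => decide (q x)) : Int)) (0 : Int) :=
        PySem.List.foldl_congr_mem _ _ _ _ (fun c i _ => hinner i c)
    _ = ((pvFreeCodes P O).countP (fun x => decide (q x)) : Int) := by
        rw [PySem.List.foldl_add, pvFreeCodes, List.countP_flatMap]
        push_cast
        rw [zero_add, List.map_map]
        rfl

-- B's histogram entry for a code v is the number of free cells carrying code v.
theorem pvB_hist (P O : List (List Int)) (v : Int) :
    PySem.Dict.getD
      ((List.range P.length).foldl (fun d i =>
        (List.range (P.getD 0 []).length).foldl (fun d j =>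
          if (O.getD i []).getD j 0 = 0 then
            PySem.Dict.insert d ((P.getD i []).getD j 0)
              (PySem.Dict.getD d ((P.getD i []).getD j 0) 0 + 1)
          else d) d) PySem.Dict.empty) v 0
    = ((pvFreeCodes P O).count v : Int) := by
  have hinner : ∀ (i : Nat) (d : PySem.Dict Int Int),
      (List.range (P.getD 0 []).length).foldl (fun d j =>
        if (O.getD i []).getD j 0 = 0 then
          PySem.Dict.insert d ((P.getD i []).getD j 0)
            (PySem.Dict.getD d ((P.getD i []).getD j 0) 0 + 1)
        else d) d
      = (((List.range (P.getD 0 []).length).filter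
            (fun j => decide ((O.getD i []).getD j 0 = 0))).map
            (fun j => (P.getD i []).getD j 0)).foldl
          (fun d x => PySem.Dict.insert d x (PySem.Dict.getD d x 0 + 1)) d := by
    intro i d
    rw [PySem.List.foldl_ite_eq_foldl_filter (fun j => (O.getD i []).getD j 0 = 0)
      (fun d j => PySem.Dict.insert d ((P.getD i []).getD j 0)
        (PySem.Dict.getD d ((P.getD i []).getD j 0) 0 + 1)), List.foldl_map]
  calc PySem.Dict.getD ((List.range P.length).foldl (fun d i =>
        (List.range (P.getD 0 []).length).foldl (fun d j =>
          if (O.getD i []).getD j 0 = 0 then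
            PySem.Dict.insert d ((P.getD i []).getD j 0)
              (PySem.Dict.getD d ((P.getD i []).getD j 0) 0 + 1)
          else d) d) PySem.Dict.empty) v 0
      = PySem.Dict.getD ((pvFreeCodes P O).foldl
          (fun d x => PySem.Dict.insert d x (PySem.Dict.getD d x 0 + 1)) PySem.Dict.empty) v 0 := by
        rw [pvFreeCodes, List.foldl_flatMap]
        congr 1
        exact PySem.List.foldl_congr_mem _ _ _ _ (fun d i _ => hinner i d)
    _ = ((pvFreeCodes P O).count v : Int) := by
        rw [PySem.Dict.getD_foldl_insert_add_one]
        rw [show (PySem.Dict.empty : PySem.Dict Int Int).getD v 0 = 0 from rfl]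
        ring

-- Counting membership in a duplicate-free code list is the sum of the individual counts.
theorem pvCountP_mem_cons (c : Int) (cs : List Int) (K : List Int) (hc : c ∉ cs) :
    K.countP (fun x => decide (x ∈ c :: cs))
      = K.count c + K.countP (fun x => decide (x ∈ cs)) := by
  induction K with
  | nil => simp
  | cons k K ih =>
    simp only [List.countP_cons, List.count_cons, ih]
    by_cases hk : k = c
    · subst hk
      simp [hc]
      omega
    · by_cases hm : k ∈ cs
      · simp [hk, hm]
        omega
      · simp [hk, hm]

theorem pvSum_counts (cs : List Int) (K : List Int) (h : cs.Nodup) :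
    cs.foldl (fun s c => s + (K.count c : Int)) 0
      = (K.countP (fun x => decide (x ∈ cs)) : Int) := by
  rw [PySem.List.foldl_add]
  induction cs with
  | nil => simp
  | cons c cs ih =>
    have hc : c ∉ cs := (List.nodup_cons.mp h).1
    have ih' := ih (List.nodup_cons.mp h).2
    rw [pvCountP_mem_cons c cs K hc]
    simp only [List.map_cons, List.sum_cons] at *
    push_cast
    omega

-- One branch of the equivalence: A's filtered count equals B's histogram-sum, whenever A's
-- predicate q coincides with membership in B's code list cs.
theorem pvBranch (P O : List (List Int)) (cs : List Int) (q : Int → Prop) [DecidablePred q]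
    (hnd : cs.Nodup) (hq : ∀ x : Int, q x ↔ x ∈ cs) :
    (List.range P.length).foldl (fun c i =>
      (List.range (P.getD 0 []).length).foldl (fun c j =>
        if q ((P.getD i []).getD j 0) ∧ (O.getD i []).getD j 0 = 0 then c + 1 else c) c) (0 : Int)
    = cs.foldl (fun s c => s +
        PySem.Dict.getD
          ((List.range P.length).foldl (fun d i =>
            (List.range (P.getD 0 []).length).foldl (fun d j =>
              if (O.getD i []).getD j 0 = 0 then
                PySem.Dict.insert d ((P.getD i []).getD j 0)
                  (PySem.Dict.getD d ((P.getD i []).getD j 0) 0 + 1)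
              else d) d) PySem.Dict.empty) c 0) 0 := by
  have hB : ∀ c : Int, PySem.Dict.getD
      ((List.range P.length).foldl (fun d i =>
        (List.range (P.getD 0 []).length).foldl (fun d j =>
          if (O.getD i []).getD j 0 = 0 then
            PySem.Dict.insert d ((P.getD i []).getD j 0)
              (PySem.Dict.getD d ((P.getD i []).getD j 0) 0 + 1)
          else d) d) PySem.Dict.empty) c 0 = ((pvFreeCodes P O).count c : Int) :=
    fun c => pvB_hist P O c
  calc _ = ((pvFreeCodes P O).countP (fun x => decide (q x)) : Int) := pvA_eq_countP P O q
    _ = ((pvFreeCodes P O).countP (fun x => decide (x ∈ cs)) : Int) := by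
        congr 1
        exact List.countP_congr (fun x _ => by simp [hq x])
    _ = cs.foldl (fun s c => s + ((pvFreeCodes P O).count c : Int)) 0 :=
        (pvSum_counts cs (pvFreeCodes P O) hnd).symm
    _ = _ := by
        apply PySem.List.foldl_congr_mem
        intro s c _
        rw [hB c]

-- ===== VERDICT (by name: the statement is the Claim_ definition above) =====
theorem contar_disponibles_de_piso_spec : Claim_equal_contar_disponibles_de_piso := by
  intro P O T _ hpre
  obtain ⟨hT, _⟩ := hpre
  unfold Spec_contar_disponibles_de_piso
  rcases hT with h | h | h | h <;> subst h <;>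
    simp only [contar_disponibles_de_piso, contar_disponibles_de_piso_alt,
      String.reduceEq, if_true, if_false]
  · rw [show PySem.Dict.get? (PySem.Dict.ofList
        [("Automóvil", [1]), ("Eléctrico", [2, 1]), ("Motocicleta", [3]), ("Discapacitado", ([4, 1] : List Int))])
        "Automóvil" = some [1] from rfl]
    exact pvBranch P O [1] (fun x => x = 1) (by decide) (fun x => by simp)
  · rw [show PySem.Dict.get? (PySem.Dict.ofList
        [("Automóvil", [1]), ("Eléctrico", [2, 1]), ("Motocicleta", [3]), ("Discapacitado", ([4, 1] : List Int))])
        "Eléctrico" = some [2, 1] from rfl]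
    exact pvBranch P O [2, 1] (fun x => x = 2 ∨ x = 1) (by decide) (fun x => by simp)
  · rw [show PySem.Dict.get? (PySem.Dict.ofList
        [("Automóvil", [1]), ("Eléctrico", [2, 1]), ("Motocicleta", [3]), ("Discapacitado", ([4, 1] : List Int))])
        "Motocicleta" = some [3] from rfl]
    exact pvBranch P O [3] (fun x => x = 3) (by decide) (fun x => by simp)
  · rw [show PySem.Dict.get? (PySem.Dict.ofList
        [("Automóvil", [1]), ("Eléctrico", [2, 1]), ("Motocicleta", [3]), ("Discapacitado", ([4, 1] : List Int))])
        "Discapacitado" = some [4, 1] from rfl]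
    exact pvBranch P O [4, 1] (fun x => x = 4 ∨ x = 1) (by decide) (fun x => by simp)
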